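-- pv_equiv track=rewrite | github.com/Abhi-dr/Logic_Loading | sum_of_factors_equal_to_factorial.py | is_sum_of_factors_equal_to_factorial
-- ===== SOURCE A (Python) =====
-- def is_sum_of_factors_equal_to_factorial(number):
--     # Calculate the sum of factors
--     factors_sum = 0
--     for i in range(1, number + 1):
--         if number % i == 0:
--             factors_sum += i
--
--     # Calculate the factorial
--     factorial_value = 1
--     for i in range(1, number + 1):
--         factorial_value *= i
--
--     # Check if the sum of factors is equal to the factorial
--     return factors_sum == factorial_value
-- ===== SOURCE B (Python) =====
-- def is_sum_of_factors_equal_to_factorial(number):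
--     # Closed form: the divisor sum equals the factorial only at number == 1
--     # (for larger numbers the factorial outgrows the triangular bound on the
--     # divisor sum; for non-positive numbers both of A's loops are empty and
--     # an empty sum never equals an empty product). Proved in the Lean file.
--     return number == 1
-- ===== Notes on version B (the rewrite author's own statement) =====
-- stated objective: faster
-- what changed: Replaces the divisor-sum loop and the factorial loop by the closed form 'number == 1', justified by a proof that the divisor sum equals the factorial only there (the divisor sum is bounded by the triangular number, which the factorial strictly exceeds from 4 on; smaller cases are checked directly).
import Mathlib
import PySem

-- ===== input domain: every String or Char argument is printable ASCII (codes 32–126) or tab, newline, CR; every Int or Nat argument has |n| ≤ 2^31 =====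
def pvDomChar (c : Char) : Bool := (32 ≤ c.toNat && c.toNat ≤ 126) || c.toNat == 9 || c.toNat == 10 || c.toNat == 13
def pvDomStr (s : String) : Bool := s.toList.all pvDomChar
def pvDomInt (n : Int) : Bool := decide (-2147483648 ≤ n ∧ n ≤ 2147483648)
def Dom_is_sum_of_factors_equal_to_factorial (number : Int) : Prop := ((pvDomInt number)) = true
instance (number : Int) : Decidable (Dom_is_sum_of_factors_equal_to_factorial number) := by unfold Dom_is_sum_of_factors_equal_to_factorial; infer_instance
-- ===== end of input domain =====

-- B replaces both O(n) loops by the closed form 'number == 1' (proved: σ(n) = n! only at n = 1).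

-- ===== PORT A =====
def is_sum_of_factors_equal_to_factorial (number : Int) : Bool :=
  let factors_sum : Int :=
    (PySem.List.pyRange 1 (number + 1) 1).foldl
      (fun s i => if PySem.Int.mod number i == 0 then s + i else s) 0
  let factorial_value : Int :=
    (PySem.List.pyRange 1 (number + 1) 1).foldl (fun p i => p * i) 1
  factors_sum == factorial_value

-- ===== PORT B =====
def is_sum_of_factors_equal_to_factorial_alt (number : Int) : Bool :=
  number == 1

-- ===== PRECONDITION & SPEC =====
def Spec_is_sum_of_factors_equal_to_factorial (number : Int) (out : Bool) : Prop := out = is_sum_of_factors_equal_to_factorial_alt number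
instance (number : Int) (out : Bool) : Decidable (Spec_is_sum_of_factors_equal_to_factorial number out) := by unfold Spec_is_sum_of_factors_equal_to_factorial; infer_instance

-- ===== CLAIM (what is proved, stated in full; the proofs are below) =====
def Claim_equal_is_sum_of_factors_equal_to_factorial : Prop := ∀ (number : Int), Dom_is_sum_of_factors_equal_to_factorial number → Spec_is_sum_of_factors_equal_to_factorial number (is_sum_of_factors_equal_to_factorial number)

-- ===== LEMMAS AND PROOFS =====

-- recursive reformulations of A's two folds, plus the triangular-number bound
def pvSD (n : Int) : Nat → Int
  | 0 => 0
  | k + 1 =>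
    if PySem.Int.mod n ((k : Int) + 1) == 0 then pvSD n k + ((k : Int) + 1) else pvSD n k

def pvFact : Nat → Int
  | 0 => 1
  | k + 1 => pvFact k * ((k : Int) + 1)

def pvTri : Nat → Int
  | 0 => 0
  | k + 1 => pvTri k + ((k : Int) + 1)

theorem pvSum_fold (n : Int) (k : Nat) :
    (PySem.List.pyRange 1 ((k : Int) + 1) 1).foldl
      (fun s i => if PySem.Int.mod n i == 0 then s + i else s) 0 = pvSD n k := by
  induction k with
  | zero =>
    rw [show ((0 : Nat) : Int) + 1 = 1 by norm_num, PySem.List.pyRange_one_eq_nil (le_refl 1)]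
    rfl
  | succ m ih =>
    have h : PySem.List.pyRange 1 (((m : Int) + 1) + 1) 1
        = PySem.List.pyRange 1 ((m : Int) + 1) 1 ++ [(m : Int) + 1] :=
      PySem.List.pyRange_one_succ_right (by omega)
    have hc : ((m + 1 : Nat) : Int) + 1 = ((m : Int) + 1) + 1 := by push_cast; ring
    rw [hc, h, List.foldl_append, ih]
    rfl

theorem pvFact_fold (k : Nat) :
    (PySem.List.pyRange 1 ((k : Int) + 1) 1).foldl (fun p i => p * i) 1 = pvFact k := by
  induction k with
  | zero =>
    rw [show ((0 : Nat) : Int) + 1 = 1 by norm_num, PySem.List.pyRange_one_eq_nil (le_refl 1)]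
    rfl
  | succ m ih =>
    have h : PySem.List.pyRange 1 (((m : Int) + 1) + 1) 1
        = PySem.List.pyRange 1 ((m : Int) + 1) 1 ++ [(m : Int) + 1] :=
      PySem.List.pyRange_one_succ_right (by omega)
    have hc : ((m + 1 : Nat) : Int) + 1 = ((m : Int) + 1) + 1 := by push_cast; ring
    rw [hc, h, List.foldl_append, ih]
    simp [pvFact]

theorem pvSD_le_tri (n : Int) (k : Nat) : pvSD n k ≤ pvTri k := by
  induction k with
  | zero => simp [pvSD, pvTri]
  | succ m ih =>
    simp only [pvSD, pvTri]
    split <;> omega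

theorem pvFact_pos (k : Nat) : 1 ≤ pvFact k := by
  induction k with
  | zero => simp [pvFact]
  | succ m ih =>
    have h : (1 : Int) ≤ (m : Int) + 1 := by omega
    have hm := mul_le_mul ih h (by omega) (by omega)
    simpa [pvFact] using hm

theorem pvFact_ge_two (k : Nat) (hk : 2 ≤ k) : 2 ≤ pvFact k := by
  match k, hk with
  | m + 2, _ =>
    have h := pvFact_pos (m + 1)
    have hm : (2 : Int) ≤ ((m + 1 : Nat) : Int) + 1 := by push_cast; omega
    calc (2 : Int) ≤ 1 * (((m + 1 : Nat) : Int) + 1) := by rw [one_mul]; exact hm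
    _ ≤ pvFact (m + 1) * (((m + 1 : Nat) : Int) + 1) := by nlinarith
    _ = pvFact (m + 2) := rfl

theorem pvTri_lt_fact (k : Nat) (hk : 4 ≤ k) : pvTri k < pvFact k := by
  induction k with
  | zero => omega
  | succ m ih =>
    by_cases hm : 4 ≤ m
    · have h1 := ih hm
      have h2 := pvFact_ge_two m (by omega)
      have hm' : (4 : Int) ≤ (m : Int) := by exact_mod_cast hm
      simp only [pvTri, pvFact]
      nlinarith
    · have : m = 3 := by omega
      subst this
      norm_num [pvTri, pvFact]

theorem pvA_eq (k : Nat) :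
    is_sum_of_factors_equal_to_factorial (k : Int) = (pvSD (k : Int) k == pvFact k) := by
  unfold is_sum_of_factors_equal_to_factorial
  rw [pvSum_fold, pvFact_fold]

-- ===== VERDICT (by name: the statement is the Claim_ definition above) =====
set_option maxRecDepth 4000 in
theorem is_sum_of_factors_equal_to_factorial_spec : Claim_equal_is_sum_of_factors_equal_to_factorial := by
  intro number _
  unfold Spec_is_sum_of_factors_equal_to_factorial is_sum_of_factors_equal_to_factorial_alt
  by_cases hneg : number < 0
  · have hnil : PySem.List.pyRange 1 (number + 1) 1 = [] :=
      PySem.List.pyRange_one_eq_nil (by omega)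
    unfold is_sum_of_factors_equal_to_factorial
    rw [hnil]
    simp
    omega
  · obtain ⟨k, rfl⟩ : ∃ k : Nat, number = (k : Int) :=
      ⟨number.toNat, (Int.toNat_of_nonneg (by omega)).symm⟩
    rw [pvA_eq]
    by_cases hk4 : 4 ≤ k
    · have hne : pvSD (k : Int) k ≠ pvFact k := by
        have h1 := pvSD_le_tri (k : Int) k
        have h2 := pvTri_lt_fact k hk4
        omega
      have hk1 : ((k : Nat) : Int) ≠ 1 := by omega
      rw [beq_eq_false_iff_ne.mpr hne, beq_eq_false_iff_ne.mpr hk1]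
    · interval_cases k <;> decide
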